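-- pv_equiv track=rewrite | github.com/thomasathul/MusicPlayerDemo | Daily_Assignments/Day-1 Assignment/problem_set_4.py | large_num
-- ===== SOURCE A (Python) =====
-- def large_num(string):
--     num = int(string)
--     res = 0
--     i = 1
--     while num//i > 0:
--         temp = (num // (i * 10)) * i + (num % i)
--         i *= 10
--         if temp > res:
--             res = temp
--     return res
-- ===== SOURCE B (Python) =====
-- def large_num(string):
--     num = int(string)
--     if num <= 0:
--         return 0
--     digits = []
--     n = num
--     while n > 0:
--         digits.append(n % 10)  # least-significant digit first
--         n //= 10
--     best = 0
--     for j in range(len(digits)):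
--         rest = digits[:j] + digits[j+1:]
--         v = 0
--         for d in reversed(rest):
--             v = v * 10 + d
--         if v > best:
--             best = v
--     return best
-- ===== Notes on version B (the rewrite author's own statement) =====
-- stated objective: alternative
-- what changed: B represents the number as an explicit list of decimal digits built once, deletes a digit by list slicing and reassembles the candidate with a Horner fold, instead of A's arithmetic deletion via // and % over a growing power of ten inside a while loop.
import Mathlib
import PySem

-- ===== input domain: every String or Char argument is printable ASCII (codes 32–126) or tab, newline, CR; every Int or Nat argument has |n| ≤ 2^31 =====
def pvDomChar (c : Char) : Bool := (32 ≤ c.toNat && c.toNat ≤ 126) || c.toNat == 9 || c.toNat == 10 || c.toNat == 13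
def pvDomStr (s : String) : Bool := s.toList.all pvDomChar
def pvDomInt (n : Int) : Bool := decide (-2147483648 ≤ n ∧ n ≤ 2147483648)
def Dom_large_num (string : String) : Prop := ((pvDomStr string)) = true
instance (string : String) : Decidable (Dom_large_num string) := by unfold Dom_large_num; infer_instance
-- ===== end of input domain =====

-- B replaces A's arithmetic digit-deletion (div/mod over growing powers of 10 in a
-- while loop) by an explicit digit list: build it once, delete a digit by list
-- slicing, reassemble by a Horner fold; same return value, alternative structure.

-- ===== PORT A =====
-- A's while loop, with fuel: i = 10^k grows each pass, so the loop runs at most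
-- num times and fuel num.natAbs + 1 always suffices (proved below).
def pvLoopA (fuel : Nat) (num i res : Int) : Int :=
  match fuel with
  | 0 => res
  | f + 1 =>
    if PySem.Int.floordiv num i > 0 then
      let temp := PySem.Int.floordiv num (i * 10) * i + PySem.Int.mod num i
      pvLoopA f num (i * 10) (if temp > res then temp else res)
    else res

def large_num (string : String) : Int :=
  match PySem.Int.ofStr? string with
  | none => 0  -- int(string) raises ValueError; excluded by Pre_large_num
  | some num => pvLoopA (num.natAbs + 1) num 1 0

-- ===== PORT B =====
-- Source B's digit-collecting while loop (least-significant first), with fuel: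
-- the loop runs at most n times, so fuel n.natAbs always suffices (proved below).
def pvDigitsB (fuel : Nat) (n : Int) : List Int :=
  match fuel with
  | 0 => []
  | f + 1 =>
    if n > 0 then PySem.Int.mod n 10 :: pvDigitsB f (PySem.Int.floordiv n 10) else []

def large_num_alt (string : String) : Int :=
  match PySem.Int.ofStr? string with
  | none => 0  -- int(string) raises ValueError; excluded by Pre_large_num
  | some num =>
    if num ≤ 0 then 0
    else
      let digits := pvDigitsB num.natAbs num
      (PySem.List.pyRange 0 (digits.length : Int) 1).foldl
        (fun best j =>
          let rest := PySem.List.slice digits none (some j) ++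
                      PySem.List.slice digits (some (j + 1)) none
          let v := rest.reverse.foldl (fun v d => v * 10 + d) 0
          if v > best then v else best) 0

-- ===== PRECONDITION & SPEC =====
-- Pre_ excludes exactly the strings on which Python's int(string) raises ValueError.
def Pre_large_num (string : String) : Prop := (PySem.Int.ofStr? string).isSome = true
instance (string : String) : Decidable (Pre_large_num string) := by unfold Pre_large_num; infer_instance
def pvWitness_large_num : String := "3729"

def Spec_large_num (string : String) (out : Int) : Prop := out = large_num_alt string
instance (string : String) (out : Int) : Decidable (Spec_large_num string out) := by unfold Spec_large_num; infer_instance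

-- ===== CLAIM (what is proved, stated in full; the proofs are below) =====
def Claim_equal_large_num : Prop := ∀ (string : String), Dom_large_num string → Pre_large_num string → Spec_large_num string (large_num string)

-- ===== LEMMAS AND PROOFS =====

-- reference: the digits of a natural number, least-significant first
def digsN (n : Nat) : List Nat :=
  if h : n = 0 then [] else n % 10 :: digsN (n / 10)
decreasing_by exact Nat.div_lt_self (Nat.pos_of_ne_zero h) (by norm_num)

-- value of a least-significant-first digit list
def valN (l : List Nat) : Nat := l.foldr (fun d v => v * 10 + d) 0

theorem valN_nil : valN [] = 0 := rfl
theorem valN_cons (d : Nat) (t : List Nat) : valN (d :: t) = valN t * 10 + d := rfl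

theorem valN_append (l1 l2 : List Nat) :
    valN (l1 ++ l2) = valN l1 + 10 ^ l1.length * valN l2 := by
  induction l1 with
  | nil => simp [valN_nil]
  | cons a t ih => simp [valN_cons, ih, pow_succ]; ring

theorem valN_digsN (n : Nat) : valN (digsN n) = n := by
  induction n using digsN.induct with
  | case1 => simp [digsN, valN_nil]
  | case2 n hn ih =>
    rw [digsN]; simp only [hn, dite_false, valN_cons, ih]
    omega

theorem valN_take_digsN (n : Nat) : ∀ m, valN ((digsN n).take m) = n % 10 ^ m := by
  induction n using digsN.induct with
  | case1 => intro m; simp [digsN, valN_nil]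
  | case2 n hn ih =>
    intro m
    rw [digsN]; simp only [hn, dite_false]
    cases m with
    | zero => simp [valN_nil, Nat.mod_one]
    | succ m =>
      rw [List.take_succ_cons, valN_cons, ih, pow_succ', Nat.mod_mul]
      ring

theorem drop_digsN (n : Nat) : ∀ m, (digsN n).drop m = digsN (n / 10 ^ m) := by
  induction n using digsN.induct with
  | case1 => intro m; simp [digsN]
  | case2 n hn ih =>
    intro m
    rw [digsN]; simp only [hn, dite_false]
    cases m with
    | zero =>
      rw [pow_zero, Nat.div_one, List.drop_zero]
      conv_rhs => rw [digsN]
      simp [hn]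
    | succ m =>
      rw [List.drop_succ_cons, ih, Nat.div_div_eq_div_mul]
      congr 1
      rw [pow_succ, mul_comm]

theorem lt_length_digsN (n : Nat) : ∀ j, j < (digsN n).length ↔ 10 ^ j ≤ n := by
  induction n using digsN.induct with
  | case1 => intro j; simp [digsN]
  | case2 n hn ih =>
    intro j
    rw [digsN]; simp only [hn, dite_false, List.length_cons]
    cases j with
    | zero =>
      simp only [pow_zero]
      omega
    | succ j =>
      rw [Nat.succ_lt_succ_iff, ih, pow_succ]
      rw [Nat.le_div_iff_mul_le (by norm_num)]

theorem length_digsN_le (n : Nat) : (digsN n).length ≤ n + 1 := by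
  by_cases h : (digsN n).length ≤ n + 1
  · exact h
  · exfalso
    have h1 : n + 1 < (digsN n).length := by omega
    have := (lt_length_digsN n (n + 1)).1 h1
    have h2 : n + 1 < 10 ^ (n + 1) := Nat.lt_pow_self (by norm_num)
    omega

-- the candidate with digit j removed, as a single step of the common fold
def stepN (N : Nat) (res : Int) (j : Nat) : Int :=
  let t : Int := ((N / 10 ^ (j + 1) * 10 ^ j + N % 10 ^ j : Nat) : Int)
  if t > res then t else res

theorem pvLoopA_eq (N : Nat) : ∀ (f j : Nat) (res : Int),
    (digsN N).length ≤ j + f →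
    pvLoopA f (N : Int) ((10 ^ j : Nat) : Int) res
      = (List.range' j ((digsN N).length - j)).foldl (stepN N) res := by
  intro f
  induction f with
  | zero =>
    intro j res hf
    have : (digsN N).length - j = 0 := by omega
    simp [pvLoopA, this]
  | succ f ih =>
    intro j res hf
    rw [pvLoopA]
    by_cases hj : j < (digsN N).length
    · have hle : 10 ^ j ≤ N := (lt_length_digsN N j).1 hj
      have hcond : PySem.Int.floordiv (N : Int) ((10 ^ j : Nat) : Int) > 0 := by
        rw [PySem.Int.floordiv_natCast]
        have : 0 < N / 10 ^ j := Nat.div_pos hle (by positivity)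
        exact_mod_cast this
      rw [if_pos hcond]
      have hmul : ((10 ^ j : Nat) : Int) * 10 = ((10 ^ (j + 1) : Nat) : Int) := by
        push_cast [pow_succ]; ring
      have htemp : PySem.Int.floordiv (N : Int) (((10 ^ j : Nat) : Int) * 10) * ((10 ^ j : Nat) : Int)
          + PySem.Int.mod (N : Int) ((10 ^ j : Nat) : Int)
          = ((N / 10 ^ (j + 1) * 10 ^ j + N % 10 ^ j : Nat) : Int) := by
        rw [hmul, PySem.Int.floordiv_natCast, PySem.Int.mod_natCast]
        push_cast; ring
      have hrange : List.range' j ((digsN N).length - j)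
          = j :: List.range' (j + 1) ((digsN N).length - (j + 1)) := by
        have : (digsN N).length - j = ((digsN N).length - (j + 1)) + 1 := by omega
        rw [this, List.range'_succ]
      rw [hrange, List.foldl_cons]
      show pvLoopA f (N : Int) (((10 ^ j : Nat) : Int) * 10)
          (if PySem.Int.floordiv (N : Int) (((10 ^ j : Nat) : Int) * 10) * ((10 ^ j : Nat) : Int)
              + PySem.Int.mod (N : Int) ((10 ^ j : Nat) : Int) > res then _ else res) = _
      rw [htemp, hmul, ih (j + 1) _ (by omega)]
      congr 1
    · have hgt : ¬ 10 ^ j ≤ N := fun h => hj ((lt_length_digsN N j).2 h)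
      have hcond : ¬ PySem.Int.floordiv (N : Int) ((10 ^ j : Nat) : Int) > 0 := by
        rw [PySem.Int.floordiv_natCast]
        have : N / 10 ^ j = 0 := Nat.div_eq_of_lt (by omega)
        simp [this]
      rw [if_neg hcond]
      have : (digsN N).length - j = 0 := by omega
      simp [this]

theorem pvDigitsB_eq : ∀ (f n : Nat), n ≤ f →
    pvDigitsB f (n : Int) = (digsN n).map (fun d => (Nat.cast d : Int)) := by
  intro f
  induction f with
  | zero =>
    intro n hn
    have : n = 0 := by omega
    subst this
    simp [pvDigitsB, digsN]
  | succ f ih =>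
    intro n hn
    rw [pvDigitsB, digsN]
    by_cases h0 : n = 0
    · subst h0; simp
    · have hpos : (0 : Int) < (n : Int) := by exact_mod_cast Nat.pos_of_ne_zero h0
      simp only [h0, dite_false, if_pos hpos]
      have h10 : (10 : Int) = ((10 : Nat) : Int) := by norm_num
      rw [h10, PySem.Int.mod_natCast, PySem.Int.floordiv_natCast,
        ih (n / 10) (by omega)]
      simp

theorem horner_map (l : List Nat) :
    ((l.map (fun d => (Nat.cast d : Int))).reverse.foldl (fun v d => v * 10 + d) 0 : Int)
      = (valN l : Int) := by
  rw [List.foldl_reverse]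
  induction l with
  | nil => rfl
  | cons a t ih =>
    rw [List.map_cons, List.foldr_cons, ih, valN_cons]
    push_cast
    ring

theorem foldB_eq (N : Nat) : ∀ (l : List Nat) (res : Int),
    (∀ k ∈ l, k < (digsN N).length) →
    (l.map (fun k => (Nat.cast k : Int))).foldl
      (fun best j =>
        let rest := PySem.List.slice ((digsN N).map (fun d => (Nat.cast d : Int))) none (some j) ++
                    PySem.List.slice ((digsN N).map (fun d => (Nat.cast d : Int))) (some (j + 1)) none
        let v := rest.reverse.foldl (fun v d => v * 10 + d) 0
        if v > best then v else best) res
      = l.foldl (stepN N) res := by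
  intro l
  induction l with
  | nil => intro res _; rfl
  | cons k t ih =>
    intro res hmem
    have hk : k < (digsN N).length := hmem k (List.mem_cons_self)
    rw [List.map_cons, List.foldl_cons, List.foldl_cons,
      ih _ (fun x hx => hmem x (List.mem_cons_of_mem _ hx))]
    congr 1
    have h1 : ((Nat.cast k : Int) + 1) = ((k + 1 : Nat) : Int) := by push_cast; ring
    have hv : (PySem.List.slice ((digsN N).map (fun d => (Nat.cast d : Int))) none (some (Nat.cast k : Int)) ++
        PySem.List.slice ((digsN N).map (fun d => (Nat.cast d : Int))) (some ((Nat.cast k : Int) + 1)) none).reverse.foldl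
          (fun v d => v * 10 + d) 0
        = ((N / 10 ^ (k + 1) * 10 ^ k + N % 10 ^ k : Nat) : Int) := by
      rw [h1, PySem.List.slice_to_natCast, PySem.List.slice_from_natCast,
        ← List.map_take, ← List.map_drop, ← List.map_append, horner_map,
        valN_append, valN_take_digsN, List.length_take, drop_digsN, valN_digsN,
        Nat.min_eq_left (by omega)]
      push_cast
      ring
    simp only [hv, stepN]

theorem large_num_eq_alt (string : String) (h : Pre_large_num string) :
    large_num string = large_num_alt string := by
  unfold Pre_large_num at h
  cases hp : PySem.Int.ofStr? string with
  | none => rw [hp] at h; simp at h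
  | some num =>
    simp only [large_num, large_num_alt, hp]
    by_cases hpos : num ≤ 0
    · rw [if_pos hpos]
      rw [pvLoopA]
      have : ¬ PySem.Int.floordiv num 1 > 0 := by
        rw [PySem.Int.floordiv_eq_ediv_of_pos (by norm_num), Int.ediv_one]
        omega
      rw [if_neg this]
    · rw [if_neg hpos]
      replace hpos : 0 < num := by omega
      obtain ⟨N, rfl⟩ : ∃ N : Nat, num = (N : Int) :=
        ⟨num.toNat, (Int.toNat_of_nonneg (by omega)).symm⟩
      have hN : 0 < N := by exact_mod_cast hpos
      have hnatAbs : (N : Int).natAbs = N := Int.natAbs_natCast N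
      rw [hnatAbs]
      -- A side
      have hL : (digsN N).length ≤ 0 + (N + 1) := by
        have := length_digsN_le N; omega
      have hA : pvLoopA (N + 1) (N : Int) ((10 ^ 0 : Nat) : Int) 0
          = (List.range' 0 ((digsN N).length - 0)).foldl (stepN N) 0 :=
        pvLoopA_eq N (N + 1) 0 0 hL
      simp only [pow_zero, Nat.cast_one, Nat.sub_zero] at hA
      rw [hA]
      -- B side
      rw [pvDigitsB_eq N N (le_refl N)]
      have hlen : ((digsN N).map (fun d => (Nat.cast d : Int))).length = (digsN N).length := by
        simp
      rw [hlen]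
      rw [PySem.List.pyRange_zero_nat]
      rw [foldB_eq N (List.range (digsN N).length) 0
        (fun k hk => List.mem_range.1 hk)]
      rw [List.range_eq_range']

-- ===== VERDICT (by name: the statement is the Claim_ definition above) =====
theorem large_num_spec : Claim_equal_large_num := by
  intro string _ hpre
  unfold Spec_large_num
  exact large_num_eq_alt string hpre
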